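-- pv_equiv track=rewrite | github.com/jsw7460/PANDAAndLinear | kendall.py | get_util_range
-- ===== SOURCE A (Python) =====
-- def get_util_range(num_proc):
--     util = [str(x) for x in range(10, num_proc * 100, 10)]
--     ret = []
--     for x in util:
--         if len(x) == 2:
--             ret.append('0.' + x)
--         else:
--             ret.append(x[:len(x) - 2] + '.' + x[len(x) - 2:])
--     return ret
-- ===== SOURCE B (Python) =====
-- def get_util_range(num_proc):
--     return [str(x // 100) + "." + str(x % 100).zfill(2)
--             for x in range(10, num_proc * 100, 10)]
-- ===== Notes on version B (the rewrite author's own statement) =====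
-- stated objective: simpler
-- what changed: B drops A's build-strings-then-measure-and-slice pass (str(x) with a length-dependent branch) and formats each value directly by integer divmod: str(x//100) + '.' + str(x%100).zfill(2), with no string surgery and no branch.
import Mathlib
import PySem

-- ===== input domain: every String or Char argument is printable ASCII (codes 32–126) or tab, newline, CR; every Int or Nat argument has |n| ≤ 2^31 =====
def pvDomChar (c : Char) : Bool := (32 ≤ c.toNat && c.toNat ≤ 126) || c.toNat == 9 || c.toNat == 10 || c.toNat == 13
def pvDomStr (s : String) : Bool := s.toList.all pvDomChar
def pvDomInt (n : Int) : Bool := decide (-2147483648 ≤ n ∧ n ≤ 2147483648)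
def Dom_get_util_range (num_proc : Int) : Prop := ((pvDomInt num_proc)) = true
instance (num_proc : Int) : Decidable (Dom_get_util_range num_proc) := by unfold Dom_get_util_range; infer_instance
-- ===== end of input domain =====

-- B replaces A's str()-then-slice with its length branch by direct divmod formatting
-- (x//100, zero-padded x%100) in one comprehension; objective: simpler, same cost.

-- ===== PORT A =====
def get_util_range (num_proc : Int) : List String :=
  let util : List String :=
    (PySem.List.pyRange 10 (num_proc * 100) 10).map (fun x => PySem.Int.toStr x)
  util.foldl (fun ret x =>
    if PySem.Str.len x = 2 then
      ret ++ ["0." ++ x]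
    else
      ret ++ [PySem.Str.slice x none (some (PySem.Str.len x - 2)) ++ "." ++
              PySem.Str.slice x (some (PySem.Str.len x - 2)) none]) []

-- ===== PORT B =====
def get_util_range_alt (num_proc : Int) : List String :=
  (PySem.List.pyRange 10 (num_proc * 100) 10).map (fun x =>
    PySem.Int.toStr (PySem.Int.floordiv x 100) ++ "." ++
    PySem.Str.zfill (PySem.Int.toStr (PySem.Int.mod x 100)) 2)

-- ===== PRECONDITION & SPEC =====
def Spec_get_util_range (num_proc : Int) (out : List String) : Prop := out = get_util_range_alt num_proc
instance (num_proc : Int) (out : List String) : Decidable (Spec_get_util_range num_proc out) := by unfold Spec_get_util_range; infer_instance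

-- ===== CLAIM (what is proved, stated in full; the proofs are below) =====
def Claim_equal_get_util_range : Prop := ∀ (num_proc : Int), Dom_get_util_range num_proc → Spec_get_util_range num_proc (get_util_range num_proc)

-- ===== LEMMAS AND PROOFS =====

-- A's loop body as a function of the pre-built string (proof helper only)
def pvAElem (x : String) : String :=
  if PySem.Str.len x = 2 then "0." ++ x
  else PySem.Str.slice x none (some (PySem.Str.len x - 2)) ++ "." ++
       PySem.Str.slice x (some (PySem.Str.len x - 2)) none

lemma pv_foldlA (l : List String) (init : List String) :
    l.foldl (fun ret x =>
      if PySem.Str.len x = 2 then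
        ret ++ ["0." ++ x]
      else
        ret ++ [PySem.Str.slice x none (some (PySem.Str.len x - 2)) ++ "." ++
                PySem.Str.slice x (some (PySem.Str.len x - 2)) none]) init
      = init ++ l.map pvAElem := by
  induction l generalizing init with
  | nil => simp
  | cons x l ih =>
    simp only [List.foldl_cons]
    rw [show (if PySem.Str.len x = 2 then init ++ ["0." ++ x]
          else init ++ [PySem.Str.slice x none (some (PySem.Str.len x - 2)) ++ "." ++
                PySem.Str.slice x (some (PySem.Str.len x - 2)) none]) = init ++ [pvAElem x] by
        unfold pvAElem; split <;> rfl]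
    rw [ih, List.map_cons]
    simp

-- toDigitsCore: the fuel does not matter once it exceeds n
lemma pv_tdc_fuel : ∀ (f1 f2 n : Nat) (acc : List Char), n < f1 → n < f2 →
    Nat.toDigitsCore 10 f1 n acc = Nat.toDigitsCore 10 f2 n acc := by
  intro f1
  induction f1 with
  | zero => intro f2 n acc h1 _; omega
  | succ f ih =>
    intro f2 n acc h1 h2
    cases f2 with
    | zero => omega
    | succ f2' =>
      simp only [Nat.toDigitsCore]
      by_cases h : n / 10 = 0
      · simp [h]
      · simp only [h, if_false]
        exact ih f2' (n / 10) _ (by omega) (by omega)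

-- toDigitsCore: the accumulator is appended on the right
lemma pv_tdc_acc : ∀ (f n : Nat) (acc : List Char),
    Nat.toDigitsCore 10 f n acc = Nat.toDigitsCore 10 f n [] ++ acc := by
  intro f
  induction f with
  | zero => intro n acc; simp [Nat.toDigitsCore]
  | succ f ih =>
    intro n acc
    simp only [Nat.toDigitsCore]
    by_cases h : n / 10 = 0
    · simp [h]
    · simp only [h, if_false]
      rw [ih (n / 10) ((n % 10).digitChar :: acc), ih (n / 10) [(n % 10).digitChar]]
      simp

lemma pv_tdc_step (f n : Nat) (acc : List Char) (hf : n < f) (hn : 10 ≤ n) :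
    Nat.toDigitsCore 10 f n acc
      = Nat.toDigitsCore 10 (f - 1) (n / 10) ((n % 10).digitChar :: acc) := by
  cases f with
  | zero => omega
  | succ f => simp only [Nat.toDigitsCore]; rw [if_neg (by omega)]; rfl

lemma pv_tdc_last (f n : Nat) (acc : List Char) (hf : 0 < f) (hn : n < 10) :
    Nat.toDigitsCore 10 f n acc = n.digitChar :: acc := by
  cases f with
  | zero => omega
  | succ f =>
    simp only [Nat.toDigitsCore]
    rw [if_pos (by omega), Nat.mod_eq_of_lt hn]

lemma pv_toDigits_small (n : Nat) (h : n < 10) : Nat.toDigits 10 n = [n.digitChar] := by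
  simp only [Nat.toDigits]
  exact pv_tdc_last _ _ _ (by omega) h

lemma pv_toDigits_two (n : Nat) (h1 : 10 ≤ n) (h2 : n < 100) :
    Nat.toDigits 10 n = [(n / 10).digitChar, (n % 10).digitChar] := by
  simp only [Nat.toDigits]
  rw [pv_tdc_step (n + 1) n [] (by omega) h1]
  exact pv_tdc_last _ _ _ (by omega) (by omega)

lemma pv_toDigits_split (n : Nat) (h : 100 ≤ n) :
    Nat.toDigits 10 n
      = Nat.toDigits 10 (n / 100) ++ [(n % 100 / 10).digitChar, (n % 10).digitChar] := by
  simp only [Nat.toDigits]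
  rw [pv_tdc_step (n + 1) n [] (by omega) (by omega)]
  rw [pv_tdc_step (n + 1 - 1) (n / 10) _ (by omega) (by omega)]
  rw [pv_tdc_fuel (n + 1 - 1 - 1) (n / 100 + 1) (n / 10 / 10) _ (by omega) (by omega)]
  rw [pv_tdc_acc]
  have h1 : n / 10 / 10 = n / 100 := by omega
  have h2 : n / 10 % 10 = n % 100 / 10 := by omega
  rw [h1, h2]

lemma pv_toDigits_len_pos (n : Nat) : 0 < (Nat.toDigits 10 n).length := by
  simp only [Nat.toDigits, Nat.toDigitsCore]
  by_cases h : n / 10 = 0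
  · simp [h]
  · simp only [h, if_false]
    rw [pv_tdc_acc]
    simp

lemma pv_toChars_natCast (n : Nat) : PySem.Int.toChars (n : Int) = Nat.toDigits 10 n := by
  simp [PySem.Int.toChars]

-- the two-digit zero-padded fraction: str(r).zfill(2) = [digitChar (r/10), digitChar (r%10)] for r < 100
lemma pv_zfill_frac (r : Nat) (h : r < 100) :
    PySem.Chars.zfill (Nat.toDigits 10 r) 2 = [(r / 10).digitChar, (r % 10).digitChar] := by
  by_cases h10 : r < 10
  · rw [pv_toDigits_small r h10]
    have h1 : r / 10 = 0 := by omega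
    have h2 : r % 10 = r := by omega
    rw [h1, h2, (by decide : Nat.digitChar 0 = '0')]
    have hc : ¬ (r.digitChar = '+' ∨ r.digitChar = '-') := by
      interval_cases r <;> decide
    simp only [PySem.Chars.zfill]
    norm_num
    rw [if_neg hc]
    rfl
  · rw [pv_toDigits_two r (by omega) h]
    simp [PySem.Chars.zfill]

-- the per-element equality: A's string surgery = B's divmod formatting, for n ≥ 10
lemma pv_elem_eq (n : Nat) (h : 10 ≤ n) :
    pvAElem (PySem.Int.toStr (n : Int))
      = PySem.Int.toStr (PySem.Int.floordiv (n : Int) 100) ++ "." ++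
        PySem.Str.zfill (PySem.Int.toStr (PySem.Int.mod (n : Int) 100)) 2 := by
  have hfd : PySem.Int.floordiv (n : Int) 100 = ((n / 100 : Nat) : Int) := by
    exact_mod_cast PySem.Int.floordiv_natCast n 100
  have hmd : PySem.Int.mod (n : Int) 100 = ((n % 100 : Nat) : Int) := by
    exact_mod_cast PySem.Int.mod_natCast n 100
  have hlen : PySem.Str.len (PySem.Int.toStr (n : Int)) = ((Nat.toDigits 10 n).length : Int) := by
    rw [PySem.Str.len_eq, PySem.Int.toList_toStr, pv_toChars_natCast]
  by_cases h100 : n < 100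
  · -- two-digit case: A takes the '0.' branch, B has whole part 0 and fraction n
    have hd2 : Nat.toDigits 10 n = [(n / 10).digitChar, (n % 10).digitChar] :=
      pv_toDigits_two n h h100
    rw [pvAElem, if_pos (by rw [hlen, hd2]; rfl)]
    apply String.toList_inj.mp
    rw [hfd, hmd]
    have hq : n / 100 = 0 := by omega
    have hr : n % 100 = n := by omega
    rw [hq, hr]
    simp only [String.toList_append, PySem.Str.toList_zfill, PySem.Int.toList_toStr,
      pv_toChars_natCast, pv_zfill_frac n h100]
    rw [hd2]
    rfl
  · -- three-or-more-digit case: A splices '.' before the last two digits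
    have hsplit := pv_toDigits_split n (by omega)
    have hlq : 0 < (Nat.toDigits 10 (n / 100)).length := pv_toDigits_len_pos _
    have hL : (Nat.toDigits 10 n).length = (Nat.toDigits 10 (n / 100)).length + 2 := by
      rw [hsplit]; simp
    rw [pvAElem, if_neg (by rw [hlen]; omega)]
    apply String.toList_inj.mp
    rw [hfd, hmd]
    simp only [String.toList_append, PySem.Str.toList_slice, PySem.Chars.slice_eq_listSlice,
      PySem.Str.toList_zfill, PySem.Int.toList_toStr, pv_toChars_natCast,
      pv_zfill_frac (n % 100) (by omega)]
    rw [hlen, hL]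
    have hb : ((((Nat.toDigits 10 (n / 100)).length + 2 : Nat) : Int) - 2)
        = (((Nat.toDigits 10 (n / 100)).length : Nat) : Int) := by push_cast; ring
    rw [hb, PySem.List.slice_to _ (by positivity), PySem.List.slice_from _ (by positivity)]
    rw [Int.toNat_natCast, hsplit]
    rw [List.take_left, List.drop_left]
    have hm : n % 100 % 10 = n % 10 := by omega
    rw [hm]

-- ===== VERDICT (by name: the statement is the Claim_ definition above) =====
theorem get_util_range_spec : Claim_equal_get_util_range := by
  intro num_proc _
  unfold Spec_get_util_range get_util_range get_util_range_alt
  rw [pv_foldlA]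
  simp only [List.nil_append, List.map_map]
  apply List.map_congr_left
  intro x hx
  have h10 : (10 : Int) ≤ x :=
    ((PySem.List.mem_pyRange_iff_of_pos (by norm_num) x).mp hx).1
  obtain ⟨n, rfl⟩ : ∃ n : Nat, x = (n : Int) :=
    ⟨x.toNat, (Int.toNat_of_nonneg (by omega)).symm⟩
  exact pv_elem_eq n (by exact_mod_cast h10)
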